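-- pv_equiv track=rewrite | github.com/Martinaa1408/Computational_Method | Lanese/script/26.02_nodict.py | check_reaction
-- ===== SOURCE A (Python) =====
-- def count_side(side):
--     elems = []
--     counts = []
--
--     for term in side.split("+"):
--         term = term.strip()
--         coef = ""
--         i = 0
--
--         while i < len(term) and term[i].isdigit():
--             coef += term[i]
--             i += 1
--         coef = int(coef) if coef else 1
--         formula = term[i:]
--
--         i = 0
--         while i < len(formula):
--             if formula[i].isupper():
--                 elem = formula[i]
--                 i += 1
--                 if i < len(formula) and formula[i].islower():
--                     elem += formula[i]
--                     i += 1
--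
--                 num = ""
--                 while i < len(formula) and formula[i].isdigit():
--                     num += formula[i]
--                     i += 1
--                 num = int(num) if num else 1
--
--                 total = coef * num
--
--                 if elem in elems:
--                     counts[elems.index(elem)] += total
--                 else:
--                     elems.append(elem)
--                     counts.append(total)
--             else:
--                 i += 1
--
--     return elems, counts
--
-- def check_reaction(line):
--     left, right = line.split("->")
--     e1, c1 = count_side(left)
--     e2, c2 = count_side(right)
--
--     all_elems = sorted(set(e1 + e2))
--     balanced = True
--     diffs = []
--
--     for e in all_elems:
--         r = c1[e1.index(e)] if e in e1 else 0
--         p = c2[e2.index(e)] if e in e2 else 0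
--
--         if r != p:
--             balanced = False
--             diffs.append((e, r, p, r - p))
--
--     return balanced, diffs
-- ===== SOURCE B (Python) =====
-- import re
--
-- _TOKEN = re.compile(r'([A-Z][a-z]?)(\d*)')
-- _COEF = re.compile(r'\d*')
--
-- def _side_counts(side):
--     counts = {}
--     for term in side.split("+"):
--         term = term.strip()
--         m = _COEF.match(term)
--         coef = int(m.group()) if m.group() else 1
--         for elem, sub in _TOKEN.findall(term[m.end():]):
--             counts[elem] = counts.get(elem, 0) + coef * (int(sub) if sub else 1)
--     return counts
--
-- def check_reaction(line):
--     left, right = line.split("->")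
--     c1 = _side_counts(left)
--     c2 = _side_counts(right)
--     diffs = [(e, c1.get(e, 0), c2.get(e, 0), c1.get(e, 0) - c2.get(e, 0))
--              for e in sorted(set(c1) | set(c2))
--              if c1.get(e, 0) != c2.get(e, 0)]
--     return (not diffs, diffs)
-- ===== Notes on version B (the rewrite author's own statement) =====
-- stated objective: idiomatic
-- what changed: The manual index-walking state machine with parallel elems/counts lists and repeated list.index lookups is replaced by a regex tokenizer (re.match for the coefficient, re.findall for element/subscript pairs) accumulating into a dict per side, and the diffs loop becomes a filter/map over the sorted merged key set.
import Mathlib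
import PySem

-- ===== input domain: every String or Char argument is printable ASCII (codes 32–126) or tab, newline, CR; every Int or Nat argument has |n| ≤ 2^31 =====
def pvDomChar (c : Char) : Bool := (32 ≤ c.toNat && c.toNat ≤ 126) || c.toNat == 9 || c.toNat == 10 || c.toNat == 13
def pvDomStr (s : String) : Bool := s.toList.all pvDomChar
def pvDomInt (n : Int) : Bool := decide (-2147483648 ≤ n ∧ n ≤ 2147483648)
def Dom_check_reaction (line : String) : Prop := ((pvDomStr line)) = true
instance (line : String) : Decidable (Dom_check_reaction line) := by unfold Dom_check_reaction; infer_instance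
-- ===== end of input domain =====

-- B replaces A's manual index-walking scanner with parallel lists and repeated list.index
-- by a regex tokenizer accumulating into a dict, and builds the diffs by filter+map (idiomatic rewrite).

-- ===== PORT A =====

-- the two identical `while … isdigit()` accumulation loops of A (coef and num)
def pvA_digits (acc : List Char) : List Char → List Char × List Char
  | [] => (acc, [])
  | c :: rest => if PySem.Chars.isdigit c then pvA_digits (acc ++ [c]) rest else (acc, c :: rest)

theorem pvA_digits_len (l : List Char) : ∀ acc, ((pvA_digits acc l).2).length ≤ l.length := by
  induction l with
  | nil => intro acc; simp [pvA_digits]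
  | cons c rest ih =>
    intro acc
    simp only [pvA_digits]
    split
    · exact le_trans (ih _) (by simp)
    · simp

-- `if elem in elems: counts[elems.index(elem)] += total else: append to both`
def pvA_upd (elems : List String) (counts : List Int) (elem : String) (total : Int) :
    List String × List Int :=
  match PySem.List.index? elems elem with
  | some j => (elems, counts.set j (counts.getD j 0 + total))   -- counts[j] += total (index in range)
  | none => (elems ++ [elem], counts ++ [total])

-- `elem = formula[i]` plus the optional following lowercase character
def pvA_elem (c : Char) : List Char → String × List Char
  | c' :: rest' =>
    if PySem.Chars.islower c' then (String.ofList [c, c'], rest') else (String.ofList [c], c' :: rest')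
  | [] => (String.ofList [c], [])

theorem pvA_elem_len (c : Char) (rest : List Char) : (pvA_elem c rest).2.length ≤ rest.length := by
  match rest with
  | [] => simp [pvA_elem]
  | c' :: rest' => simp only [pvA_elem]; split <;> simp

-- the inner `while i < len(formula)` scan of count_side
def pvA_scan (coef : Int) : List Char → List String × List Int → List String × List Int
  | [], st => st
  | c :: rest, st =>
    if PySem.Chars.isupper c then
      -- elem = formula[i] (+ optional following lowercase)
      let p := pvA_elem c rest
      let q := pvA_digits [] p.2
      let numv : Int := if q.1 = [] then 1 else (PySem.Int.ofChars? q.1).getD 0  -- int(num) (all digits, nonempty: getD unreachable)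
      pvA_scan coef q.2 (pvA_upd st.1 st.2 p.1 (coef * numv))
    else
      pvA_scan coef rest st
termination_by l _ => l.length
decreasing_by
  · have h1 : (pvA_digits [] (pvA_elem c rest).2).2.length ≤ (pvA_elem c rest).2.length :=
      pvA_digits_len _ _
    have h2 := pvA_elem_len c rest
    simp only [List.length_cons]; omega
  · simp

def pvA_countSide (side : List Char) : List String × List Int :=
  (PySem.Chars.splitOn side ['+']).foldl
    (fun st term =>
      let term' := PySem.Chars.strip term
      let q := pvA_digits [] term'                               -- leading-digit coefficient loop
      let coefv : Int := if q.1 = [] then 1 else (PySem.Int.ofChars? q.1).getD 0  -- int(coef) (getD unreachable)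
      pvA_scan coefv q.2 st)
    ([], [])

def check_reaction (line : String) : Bool × (List (String × Int × Int × Int)) :=
  match PySem.Chars.splitOn line.toList ['-', '>'] with
  | [left, right] =>                                             -- `left, right = line.split("->")`
    let ec1 := pvA_countSide left
    let ec2 := pvA_countSide right
    let allElems := PySem.List.sorted (PySem.Set.ofList (ec1.1 ++ ec2.1)) id
    allElems.foldl
      (fun st e =>
        let r : Int := if ec1.1.contains e then ec1.2.getD ((PySem.List.index? ec1.1 e).getD 0) 0 else 0
        let pp : Int := if ec2.1.contains e then ec2.2.getD ((PySem.List.index? ec2.1 e).getD 0) 0 else 0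
        if r ≠ pp then (false, st.2 ++ [(e, r, pp, r - pp)]) else st)
      (true, [])
  | _ => (true, [])                                              -- unreachable under Pre_ (ValueError in Python)

-- ===== PORT B =====

-- hand port of re.findall(r'([A-Z][a-z]?)(\d*)', s): exact for this pattern on ASCII input
def pvB_findall : List Char → List (String × List Char)
  | [] => []
  | c :: rest =>
    if PySem.Chars.isupper c then
      match rest with
      | c' :: rest' =>
        if PySem.Chars.islower c' then
          (String.ofList [c, c'], rest'.takeWhile PySem.Chars.isdigit)
            :: pvB_findall (rest'.dropWhile PySem.Chars.isdigit)
        else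
          (String.ofList [c], (c' :: rest').takeWhile PySem.Chars.isdigit)
            :: pvB_findall ((c' :: rest').dropWhile PySem.Chars.isdigit)
      | [] => [(String.ofList [c], [])]
    else
      pvB_findall rest
termination_by l => l.length
decreasing_by all_goals
  first
    | (have := List.length_dropWhile_le PySem.Chars.isdigit rest'
       simp only [List.length_cons] at *; omega)
    | (have := List.length_dropWhile_le PySem.Chars.isdigit (c' :: rest')
       simp only [List.length_cons] at *; omega)
    | simp

def pvB_sideCounts (side : List Char) : PySem.Dict String Int :=
  (PySem.Chars.splitOn side ['+']).foldl
    (fun d term =>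
      let term' := PySem.Chars.strip term
      let coefDigits := term'.takeWhile PySem.Chars.isdigit      -- re.match(r'\d*', term).group()
      let coefv : Int := if coefDigits = [] then 1 else (PySem.Int.ofChars? coefDigits).getD 0
      (pvB_findall (term'.dropWhile PySem.Chars.isdigit)).foldl
        (fun d t =>
          d.insert t.1 (d.getD t.1 0 + coefv * (if t.2 = [] then 1 else (PySem.Int.ofChars? t.2).getD 0)))
        d)
    PySem.Dict.empty

def check_reaction_alt (line : String) : Bool × (List (String × Int × Int × Int)) :=
  match PySem.Chars.splitOn line.toList ['-', '>'] with
  | [] => (true, [])                                             -- unreachable under Pre_ (ValueError in Python)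
  | [_] => (true, [])                                            -- unreachable under Pre_ (ValueError in Python)
  | left :: right :: _ =>
    let c1 := pvB_sideCounts left
    let c2 := pvB_sideCounts right
    let diffs :=
      ((PySem.List.sorted ((PySem.Set.ofList c1.keys).union (PySem.Set.ofList c2.keys)) id).filter
          (fun e => c1.getD e 0 != c2.getD e 0)).map
        (fun e => (e, c1.getD e 0, c2.getD e 0, c1.getD e 0 - c2.getD e 0))
    (diffs.isEmpty, diffs)

-- ===== PRECONDITION & SPEC =====
-- Pre_ excludes exactly the lines on which A's two-variable unpacking of the split on the arrow
-- separator raises ValueError (the split does not yield two parts); B raises identically there.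
def Pre_check_reaction (line : String) : Prop :=
  (PySem.Chars.splitOn line.toList ['-', '>']).length = 2
instance (line : String) : Decidable (Pre_check_reaction line) := by
  unfold Pre_check_reaction; infer_instance

def pvWitness_check_reaction : String := "2H2 + O2 -> 2H2O"

def Spec_check_reaction (line : String) (out : Bool × (List (String × Int × Int × Int))) : Prop :=
  out = check_reaction_alt line
instance (line : String) (out : Bool × (List (String × Int × Int × Int))) :
    Decidable (Spec_check_reaction line out) := by unfold Spec_check_reaction; infer_instance

-- ===== CLAIM =====
def Claim_equal_check_reaction : Prop :=
  ∀ (line : String), Dom_check_reaction line → Pre_check_reaction line →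
    Spec_check_reaction line (check_reaction line)

-- ===== LEMMAS AND PROOFS =====

-- A's (elems, counts) parallel lists represent exactly B's dict
def pvRel (elems : List String) (counts : List Int) (d : PySem.Dict String Int) : Prop :=
  d.items = elems.zip counts ∧ counts.length = elems.length ∧ elems.Nodup

theorem pvA_digits_eq (l : List Char) : ∀ acc,
    pvA_digits acc l = (acc ++ l.takeWhile PySem.Chars.isdigit, l.dropWhile PySem.Chars.isdigit) := by
  induction l with
  | nil => intro acc; simp [pvA_digits]
  | cons c rest ih =>
    intro acc
    simp only [pvA_digits, List.takeWhile_cons, List.dropWhile_cons]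
    split <;> simp_all

theorem pv_zip_find (e : List String) : ∀ (c : List Int), c.length = e.length → ∀ s,
    List.find? (fun p => p.1 == s) (e.zip c) =
      (List.idxOf? s e).map (fun j => (s, c.getD j 0)) := by
  induction e with
  | nil => intro c h s; simp at h; simp [h]
  | cons a e' ih =>
    intro c h s
    match c with
    | [] => simp at h
    | b :: c' =>
      simp only [List.zip_cons_cons, List.find?_cons, List.idxOf?_cons]
      by_cases hab : a == s
      · simp [eq_of_beq hab]
      · simp only [hab, if_neg, Bool.false_eq_true, not_false_iff]
        rw [ih c' (by simpa using h) s]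
        cases List.idxOf? s e' <;> simp

theorem pvRel_getD {e : List String} {c : List Int} {d : PySem.Dict String Int}
    (h : pvRel e c d) (s : String) :
    d.getD s 0 = if e.contains s then c.getD ((PySem.List.index? e s).getD 0) 0 else 0 := by
  obtain ⟨hi, hl, hn⟩ := h
  simp only [PySem.Dict.getD, PySem.Dict.get?, hi, pv_zip_find e c hl s, PySem.List.index?]
  by_cases hm : s ∈ e
  · obtain ⟨j, hj⟩ := Option.isSome_iff_exists.mp (List.isSome_idxOf?.mpr hm)
    simp [hj, hm]
  · rw [List.idxOf?_eq_none_iff.mpr hm]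
    simp [hm]

theorem pv_zip_replace (e : List String) : ∀ (c : List Int) (j : Nat), c.length = e.length →
    e.Nodup → ∀ s v, List.idxOf? s e = some j →
    (e.zip c).map (fun p => if p.1 == s then (s, v) else p) = e.zip (c.set j v) := by
  induction e with
  | nil => intro c j _ _ s v hj; simp at hj
  | cons a e' ih =>
    intro c j hl hn s v hj
    match c with
    | [] => simp at hl
    | b :: c' =>
      rw [List.idxOf?_cons] at hj
      by_cases hab : a == s
      · simp only [hab, if_pos] at hj
        obtain rfl : j = 0 := by simpa using hj.symm
        have hsa : s = a := (eq_of_beq hab).symm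
        subst hsa
        simp only [List.zip_cons_cons, List.map_cons, List.set_cons_zero, if_pos, beq_self_eq_true]
        congr 1
        have hs : s ∉ e' := (List.nodup_cons.mp hn).1
        calc (e'.zip c').map (fun p => if p.1 == s then (s, v) else p)
            = (e'.zip c').map id := by
              apply List.map_congr_left
              intro p hp
              obtain ⟨x, y⟩ := p
              have hxm : x ∈ e' := (List.of_mem_zip hp).1
              simp [show (x == s) = false by simpa using fun hps : x = s => hs (hps ▸ hxm)]
          _ = e'.zip c' := List.map_id _
      · simp only [hab, Bool.false_eq_true, if_neg, not_false_iff, Option.map_eq_some_iff] at hj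
        obtain ⟨j', hj', rfl⟩ := hj
        simp only [List.zip_cons_cons, List.map_cons, List.set_cons_succ, hab]
        rw [ih c' j' (by simpa using hl) hn.of_cons s v hj']
        simp

theorem pvUpd_rel {e : List String} {c : List Int} {d : PySem.Dict String Int}
    (h : pvRel e c d) (s : String) (t : Int) :
    pvRel (pvA_upd e c s t).1 (pvA_upd e c s t).2 (d.insert s (d.getD s 0 + t)) := by
  obtain ⟨hi, hl, hn⟩ := h
  have hget := pvRel_getD ⟨hi, hl, hn⟩ s
  by_cases hm : s ∈ e
  · obtain ⟨j, hj⟩ := Option.isSome_iff_exists.mp (List.isSome_idxOf?.mpr hm)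
    have hcont : (e.zip c).any (fun p => p.1 == s) = true := by
      have hmap : ((e.zip c).map Prod.fst).any (fun x => x == s) = (e.zip c).any (fun p => p.1 == s) := by
        rw [List.any_map]; rfl
      rw [← hmap, List.map_fst_zip (by omega)]
      simp only [List.any_eq_true]
      exact ⟨s, hm, by simp⟩
    have hgv : d.getD s 0 = c.getD j 0 := by
      rw [hget]; simp [PySem.List.index?, hj, hm]
    rw [hgv]
    unfold pvA_upd PySem.Dict.insert
    simp only [PySem.Dict.contains, hi, PySem.List.index?, hj, hcont, if_pos]
    exact ⟨by rw [pv_zip_replace e c j hl hn s _ hj], by simpa using hl, hn⟩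
  · have hcont : (e.zip c).any (fun p => p.1 == s) = false := by
      have hmap : ((e.zip c).map Prod.fst).any (fun x => x == s) = (e.zip c).any (fun p => p.1 == s) := by
        rw [List.any_map]; rfl
      rw [← hmap, List.map_fst_zip (by omega)]
      simp only [List.any_eq_false]
      intro x hx
      simpa using fun hxs : x = s => hm (hxs ▸ hx)
    have hgv : d.getD s 0 = 0 := by
      have hc : e.contains s = false := by simpa using hm
      rw [hget, hc]; simp
    rw [hgv, zero_add]
    unfold pvA_upd PySem.Dict.insert
    simp only [PySem.Dict.contains, hi, PySem.List.index?, List.idxOf?_eq_none_iff.mpr hm,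
      hcont, Bool.false_eq_true, if_neg, not_false_iff]
    refine ⟨by rw [List.zip_append (by omega)]; simp, by simp [hl], ?_⟩
    rw [List.nodup_append]
    exact ⟨hn, List.nodup_singleton _,
      by intro x hx y hy; simp only [List.mem_singleton] at hy; subst hy; exact fun hxe => hm (hxe ▸ hx)⟩

theorem pvScan_rel (n : Nat) : ∀ (f : List Char), f.length ≤ n → ∀ (coef : Int) e c d,
    pvRel e c d →
    pvRel (pvA_scan coef f (e, c)).1 (pvA_scan coef f (e, c)).2
      ((pvB_findall f).foldl
        (fun d t =>
          d.insert t.1 (d.getD t.1 0 + coef * (if t.2 = [] then 1 else (PySem.Int.ofChars? t.2).getD 0)))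
        d) := by
  induction n with
  | zero =>
    intro f hf coef e c d h
    have hfe : f = [] := List.eq_nil_of_length_eq_zero (Nat.le_zero.mp hf)
    subst hfe
    simpa [pvA_scan, pvB_findall] using h
  | succ n ih =>
    intro f hf coef e c d h
    match f with
    | [] => simpa [pvA_scan, pvB_findall] using h
    | ch :: rest =>
      by_cases hu : PySem.Chars.isupper ch
      · match rest with
        | [] =>
          rw [pvA_scan, pvB_findall]
          simp only [hu, if_pos, pvA_elem, pvA_digits, List.foldl_cons, List.foldl_nil]
          have hup := pvUpd_rel h (String.ofList [ch]) (coef * 1)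
          rw [pvA_scan]
          simpa using hup
        | c' :: rest' =>
          by_cases hlow : PySem.Chars.islower c'
          · rw [pvA_scan, pvB_findall]
            simp only [hu, hlow, if_pos, pvA_elem, pvA_digits_eq, List.nil_append,
              List.foldl_cons]
            have hup := pvUpd_rel h (String.ofList [ch, c'])
              (coef * (if rest'.takeWhile PySem.Chars.isdigit = [] then 1
                else (PySem.Int.ofChars? (rest'.takeWhile PySem.Chars.isdigit)).getD 0))
            have hlen : (rest'.dropWhile PySem.Chars.isdigit).length ≤ n := by
              have := List.length_dropWhile_le PySem.Chars.isdigit rest'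
              simp only [List.length_cons] at hf; omega
            simpa using ih _ hlen coef _ _ _ hup
          · rw [pvA_scan, pvB_findall]
            simp only [hu, hlow, if_pos, if_neg, pvA_elem, pvA_digits_eq, List.nil_append,
              List.foldl_cons, Bool.false_eq_true, not_false_iff]
            have hup := pvUpd_rel h (String.ofList [ch])
              (coef * (if (c' :: rest').takeWhile PySem.Chars.isdigit = [] then 1
                else (PySem.Int.ofChars? ((c' :: rest').takeWhile PySem.Chars.isdigit)).getD 0))
            have hlen : ((c' :: rest').dropWhile PySem.Chars.isdigit).length ≤ n := by
              have := List.length_dropWhile_le PySem.Chars.isdigit (c' :: rest')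
              simp only [List.length_cons] at *; omega
            simpa using ih _ hlen coef _ _ _ hup
      · rw [pvA_scan, pvB_findall.eq_def]
        simp only [hu, Bool.false_eq_true, if_neg, not_false_iff]
        exact ih rest (by simp only [List.length_cons] at hf; omega) coef e c d h

theorem pvSideFold_rel (terms : List (List Char)) : ∀ (st : List String × List Int)
    (d : PySem.Dict String Int), pvRel st.1 st.2 d →
    pvRel
      ((terms.foldl (fun st term =>
        let term' := PySem.Chars.strip term
        let q := pvA_digits [] term'
        let coefv : Int := if q.1 = [] then 1 else (PySem.Int.ofChars? q.1).getD 0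
        pvA_scan coefv q.2 st) st)).1
      ((terms.foldl (fun st term =>
        let term' := PySem.Chars.strip term
        let q := pvA_digits [] term'
        let coefv : Int := if q.1 = [] then 1 else (PySem.Int.ofChars? q.1).getD 0
        pvA_scan coefv q.2 st) st)).2
      (terms.foldl (fun d term =>
        let term' := PySem.Chars.strip term
        let coefDigits := term'.takeWhile PySem.Chars.isdigit
        let coefv : Int := if coefDigits = [] then 1 else (PySem.Int.ofChars? coefDigits).getD 0
        (pvB_findall (term'.dropWhile PySem.Chars.isdigit)).foldl
          (fun d t =>
            d.insert t.1 (d.getD t.1 0 + coefv * (if t.2 = [] then 1 else (PySem.Int.ofChars? t.2).getD 0)))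
          d) d) := by
  induction terms with
  | nil => intro st d h; simpa using h
  | cons term ts ih =>
    intro st d h
    simp only [List.foldl_cons]
    apply ih
    simp only [pvA_digits_eq, List.nil_append]
    have := pvScan_rel ((PySem.Chars.strip term).dropWhile PySem.Chars.isdigit).length
      ((PySem.Chars.strip term).dropWhile PySem.Chars.isdigit) le_rfl
      (if (PySem.Chars.strip term).takeWhile PySem.Chars.isdigit = [] then 1
        else (PySem.Int.ofChars? ((PySem.Chars.strip term).takeWhile PySem.Chars.isdigit)).getD 0)
      st.1 st.2 d h
    simpa using this

theorem pvSide_rel (side : List Char) :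
    pvRel (pvA_countSide side).1 (pvA_countSide side).2 (pvB_sideCounts side) := by
  unfold pvA_countSide pvB_sideCounts
  exact pvSideFold_rel _ ([], []) PySem.Dict.empty ⟨rfl, rfl, List.nodup_nil⟩

theorem pvRel_keys {e : List String} {c : List Int} {d : PySem.Dict String Int}
    (h : pvRel e c d) : d.keys = e := by
  obtain ⟨hi, hl, _⟩ := h
  simp only [PySem.Dict.keys, hi]
  exact List.map_fst_zip (by omega)

theorem pvSorted_eq (e1 e2 : List String) :
    PySem.List.sorted (PySem.Set.ofList (e1 ++ e2)) id =
      PySem.List.sorted ((PySem.Set.ofList e1).union (PySem.Set.ofList e2)) id := by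
  have hx : (PySem.Set.ofList (e1 ++ e2) : List String).Nodup := PySem.Set.nodup_ofList _
  have hy : ((PySem.Set.ofList e1).union (PySem.Set.ofList e2) : List String).Nodup :=
    PySem.Set.nodup_union _ _ (PySem.Set.nodup_ofList _)
  have hperm : (PySem.Set.ofList (e1 ++ e2) : List String).Perm
      ((PySem.Set.ofList e1).union (PySem.Set.ofList e2)) := by
    rw [List.perm_ext_iff_of_nodup hx hy]
    intro a
    simp [PySem.Set.mem_ofList, PySem.Set.mem_union, List.mem_append]
  symm
  apply PySem.List.sorted_eq_of_perm_of_pairwise_lt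
  · exact (PySem.List.sorted_perm _ _ _).trans hperm
  · have hle := PySem.List.sorted_pairwise (PySem.Set.ofList (e1 ++ e2)) (id : String → String)
    have hnd : (PySem.List.sorted (PySem.Set.ofList (e1 ++ e2)) id).Nodup :=
      (PySem.List.sorted_perm _ _ _).nodup_iff.mpr hx
    exact (hle.and hnd).imp (fun h => lt_of_le_of_ne h.1 h.2)

theorem pvFold_diffs (f g : String → Int) : ∀ (l : List String) (b : Bool)
    (acc : List (String × Int × Int × Int)),
    l.foldl (fun st e => if f e ≠ g e then (false, st.2 ++ [(e, f e, g e, f e - g e)]) else st) (b, acc)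
      = (b && (l.filter (fun e => f e != g e)).isEmpty,
         acc ++ (l.filter (fun e => f e != g e)).map (fun e => (e, f e, g e, f e - g e))) := by
  intro l
  induction l with
  | nil => intro b acc; simp
  | cons x l ih =>
    intro b acc
    rw [List.foldl_cons, List.filter_cons]
    by_cases h : f x = g x
    · rw [if_neg (by simp [h]), ih]
      simp [h]
    · rw [if_pos (by simp [h]), ih]
      simp [h, bne_iff_ne]

-- ===== VERDICT =====
theorem check_reaction_spec : Claim_equal_check_reaction := by
  intro line hdom hpre
  unfold Pre_check_reaction at hpre
  obtain ⟨l, r, hp⟩ := List.length_eq_two.mp hpre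
  unfold Spec_check_reaction check_reaction check_reaction_alt
  rw [hp]
  have h1 := pvSide_rel l
  have h2 := pvSide_rel r
  simp only [pvRel_getD h1, pvRel_getD h2, pvRel_keys h1, pvRel_keys h2,
    ← pvSorted_eq _ _, pvFold_diffs]
  simp [List.isEmpty_map]
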